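-- pv_equiv track=rewrite | github.com/316937390/alg | Sort_Search/binary_search.py | bs_last_eq
-- ===== SOURCE A (Python) =====
-- def bs_last_eq(arr,n,value):
--     low = 0
--     high = n-1
--     while low<=high:
--         mid = low + ((high-low)>>1)
--         if arr[mid] == value and (mid == (n-1) or arr[mid+1] > value):
--             return mid
--         elif arr[mid] == value and arr[mid+1] == value:
--             low = mid+1
--         elif arr[mid] < value:
--             low = mid+1
--         elif arr[mid] > value:
--             high = mid-1
--     return -1
-- ===== SOURCE B (Python) =====
-- def bs_last_eq(arr, n, value):
--     # upper-bound binary search over [lo, hi), equality checked once after the loop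
--     lo, hi = 0, n
--     while lo < hi:
--         mid = (lo + hi) // 2
--         if arr[mid] <= value:
--             lo = mid + 1
--         else:
--             hi = mid
--     idx = lo - 1
--     if idx >= 0 and arr[idx] == value:
--         return idx
--     return -1
-- ===== Notes on version B (the rewrite author's own statement) =====
-- stated objective: simpler
-- what changed: Replaces A's closed-interval search with four in-loop cases (including an in-loop equality/last-occurrence test) by a half-open upper-bound binary search with a single comparison per iteration and one equality post-check after the loop; Pre_ excludes unsorted prefixes (binary-search probe sequences diverge there and A can loop forever) and n > len(arr) (either side can raise IndexError).
-- outside the precondition, e.g. on bs_last_eq([1, 0], 2, 0): A returns -1, B returns 1; on bs_last_eq([1], 2, 0): A returns -1, B raises IndexError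
import Mathlib
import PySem

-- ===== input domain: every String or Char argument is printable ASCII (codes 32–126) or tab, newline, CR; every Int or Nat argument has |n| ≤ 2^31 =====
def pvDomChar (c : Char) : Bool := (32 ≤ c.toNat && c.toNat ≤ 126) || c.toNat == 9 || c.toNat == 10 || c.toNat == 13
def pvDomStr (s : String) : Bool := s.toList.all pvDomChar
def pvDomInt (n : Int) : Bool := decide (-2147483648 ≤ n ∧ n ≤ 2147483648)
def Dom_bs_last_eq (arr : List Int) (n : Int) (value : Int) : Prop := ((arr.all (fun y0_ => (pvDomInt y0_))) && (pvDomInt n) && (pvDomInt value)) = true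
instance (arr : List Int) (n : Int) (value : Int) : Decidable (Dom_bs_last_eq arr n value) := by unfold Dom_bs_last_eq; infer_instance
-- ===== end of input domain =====

-- B replaces A's closed-interval search (four in-loop cases with an in-loop last-occurrence
-- test) by a half-open upper-bound binary search with a single equality post-check: simpler.

-- ===== PORT A =====
-- A's while-loop; fuel only makes the recursion total (Python diverges / raises only
-- outside Pre_, where we claim nothing). pyGet? none = Python IndexError.
def bsA_loop (arr : List Int) (n value : Int) (low high : Int) : Nat → Int
  | 0 => -1
  | fuel + 1 =>
    if low ≤ high then
      let mid := low + PySem.Int.floordiv (high - low) 2   -- (high-low)>>1 = floor div by 2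
      match PySem.List.pyGet? arr mid with
      | none => -1
      | some am =>
        if am = value then
          if mid = n - 1 then mid
          else
            match PySem.List.pyGet? arr (mid + 1) with
            | none => -1
            | some am1 =>
              if value < am1 then mid
              else if am1 = value then bsA_loop arr n value (mid + 1) high fuel
              else bsA_loop arr n value low high fuel      -- Python loops forever here
        else if am < value then bsA_loop arr n value (mid + 1) high fuel
        else bsA_loop arr n value low (mid - 1) fuel
    else -1

def bs_last_eq (arr : List Int) (n : Int) (value : Int) : Int :=
  bsA_loop arr n value 0 (n - 1) (n.toNat + 1)

-- ===== PORT B =====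
def bsB_loop (arr : List Int) (value : Int) (lo hi : Int) : Nat → Int
  | 0 => lo
  | fuel + 1 =>
    if lo < hi then
      let mid := PySem.Int.floordiv (lo + hi) 2
      match PySem.List.pyGet? arr mid with
      | none => lo                                         -- Python IndexError: outside Pre_
      | some am =>
        if am ≤ value then bsB_loop arr value (mid + 1) hi fuel
        else bsB_loop arr value lo mid fuel
    else lo

def bs_last_eq_alt (arr : List Int) (n : Int) (value : Int) : Int :=
  let lo := bsB_loop arr value 0 n (n.toNat + 1)
  let idx := lo - 1
  if 0 ≤ idx then
    match PySem.List.pyGet? arr idx with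
    | some v => if v = value then idx else -1
    | none => -1
  else -1

-- ===== PRECONDITION & SPEC =====
-- Pre_ excludes inputs with an unsorted prefix arr[0:n] (A is a binary search: there the two
-- probe sequences diverge, and A can loop forever) and inputs with n > len(arr) (either side
-- can raise IndexError); for n ≤ 0 neither program reads arr, so nothing is assumed.
def Pre_bs_last_eq (arr : List Int) (n : Int) (value : Int) : Prop :=
  n ≤ 0 ∨ (List.Pairwise (· ≤ ·) (arr.take n.toNat) ∧ n ≤ arr.length)
instance (arr : List Int) (n : Int) (value : Int) : Decidable (Pre_bs_last_eq arr n value) := by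
  unfold Pre_bs_last_eq; infer_instance

def pvWitness_bs_last_eq : List Int × Int × Int := ([1, 2, 2, 3], 4, 2)

def Spec_bs_last_eq (arr : List Int) (n : Int) (value : Int) (out : Int) : Prop := out = bs_last_eq_alt arr n value
instance (arr : List Int) (n : Int) (value : Int) (out : Int) : Decidable (Spec_bs_last_eq arr n value out) := by unfold Spec_bs_last_eq; infer_instance

-- ===== CLAIM (what is proved, stated in full; the proofs are below) =====
def Claim_equal_bs_last_eq : Prop := ∀ (arr : List Int) (n : Int) (value : Int), Dom_bs_last_eq arr n value → Pre_bs_last_eq arr n value → Spec_bs_last_eq arr n value (bs_last_eq arr n value)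

-- ===== LEMMAS AND PROOFS =====

-- Python's '//' (and '>>1') by 2 agrees with Lean's euclidean division by 2.
theorem pv_fd (a : Int) : PySem.Int.floordiv a 2 = a / 2 := by
  simp [PySem.Int.floordiv, Int.fdiv_eq_ediv]

-- A sorted prefix is pointwise monotone.
theorem pv_mono {arr : List Int} {m : Nat} (hs : List.Pairwise (· ≤ ·) (arr.take m))
    {i j : Nat} (hij : i ≤ j) (hjm : j < m) (hj : j < arr.length) :
    arr[i]'(by omega) ≤ arr[j] := by
  rcases Nat.lt_or_ge i j with h | h
  · have hp := (List.pairwise_iff_getElem.mp hs) i j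
      (by simp [List.length_take]; omega) (by simp [List.length_take]; omega) h
    simpa [List.getElem_take] using hp
  · have : i = j := by omega
    subst this; exact le_refl _

-- B's loop returns a boundary r: everything below r is ≤ value, everything in [r, n) is > value.
theorem bsB_loop_spec (arr : List Int) (value n : Int)
    (hs : List.Pairwise (· ≤ ·) (arr.take n.toNat)) (hn : n ≤ arr.length) :
    ∀ (fuel : Nat) (lo hi : Int), 0 ≤ lo → lo ≤ hi → hi ≤ n → (hi - lo).toNat < fuel →
    (∀ (i : Nat) (h : i < arr.length), (i : Int) < lo → arr[i] ≤ value) →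
    (∀ (i : Nat) (h : i < arr.length), hi ≤ (i : Int) → (i : Int) < n → value < arr[i]) →
    lo ≤ bsB_loop arr value lo hi fuel ∧ bsB_loop arr value lo hi fuel ≤ hi ∧
    (∀ (i : Nat) (h : i < arr.length), (i : Int) < bsB_loop arr value lo hi fuel → arr[i] ≤ value) ∧
    (∀ (i : Nat) (h : i < arr.length), bsB_loop arr value lo hi fuel ≤ (i : Int) → (i : Int) < n → value < arr[i]) := by
  intro fuel
  induction fuel with
  | zero => intro lo hi _ _ _ hf; omega
  | succ fuel ih =>
    intro lo hi hlo0 hlohi hhin hf hbelow habove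
    simp only [bsB_loop, pv_fd]
    by_cases hlt : lo < hi
    · simp only [if_pos hlt]
      have hmlen : ((lo + hi) / 2).toNat < arr.length := by omega
      rw [PySem.List.pyGet?_eq_some_getElem arr (by omega) (by omega)]
      by_cases ham : arr[((lo + hi) / 2).toNat]'hmlen ≤ value
      · simp only [if_pos ham]
        refine (ih ((lo + hi) / 2 + 1) hi (by omega) (by omega) hhin (by omega) ?_ habove).imp
          (by omega) (fun h => h)
        intro i h hi'
        rcases Nat.lt_or_ge i ((lo + hi) / 2).toNat with hc | hc
        · exact le_trans (pv_mono hs (by omega) (by omega) hmlen) ham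
        · have : i = ((lo + hi) / 2).toNat := by omega
          subst this; exact ham
      · simp only [if_neg ham]
        refine (ih lo ((lo + hi) / 2) (by omega) (by omega) (by omega) (by omega) hbelow ?_).imp
          (fun h => h) (fun h => ⟨by omega, h.2⟩)
        intro i h hi1 hi2
        have hle : ((lo + hi) / 2).toNat ≤ i := by omega
        exact lt_of_not_ge (fun hle' => ham (le_trans (pv_mono hs hle (by omega) h) hle'))
    · simp only [if_neg hlt]
      exact ⟨le_refl _, by omega, fun i h hi' => hbelow i h (by omega),
             fun i h hi1 hi2 => habove i h (by omega) hi2⟩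

-- A's loop, given the boundary r, returns r-1 if arr[r-1] = value else -1.
theorem bsA_loop_spec (arr : List Int) (n value : Int)
    (hs : List.Pairwise (· ≤ ·) (arr.take n.toNat)) (hn : n ≤ arr.length) (r : Int)
    (hr0 : 0 ≤ r) (hrn : r ≤ n)
    (hbelow : ∀ (i : Nat) (h : i < arr.length), (i : Int) < r → arr[i] ≤ value)
    (habove : ∀ (i : Nat) (h : i < arr.length), r ≤ (i : Int) → (i : Int) < n → value < arr[i]) :
    ∀ (fuel : Nat) (low high : Int), 0 ≤ low → high ≤ n - 1 → (high - low + 1).toNat < fuel →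
    ((1 ≤ r ∧ ∃ h : (r - 1).toNat < arr.length, arr[(r-1).toNat] = value) → low ≤ r - 1 ∧ r - 1 ≤ high) →
    bsA_loop arr n value low high fuel =
      if 1 ≤ r ∧ ∃ h : (r - 1).toNat < arr.length, arr[(r-1).toNat] = value then r - 1 else -1 := by
  intro fuel
  induction fuel with
  | zero => intro low high _ _ hf _; exact absurd hf (by omega)
  | succ fuel ih =>
    intro low high hlow0 hhigh hf htgt
    simp only [bsA_loop, pv_fd]
    by_cases hle : low ≤ high
    · simp only [if_pos hle]
      have hmlen : (low + (high - low) / 2).toNat < arr.length := by omega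
      rw [PySem.List.pyGet?_eq_some_getElem arr (by omega) (by omega)]
      by_cases ham : arr[(low + (high - low) / 2).toNat]'hmlen = value
      · -- arr[mid] = value, hence mid < r, hence the target exists and mid ≤ r-1
        have hmr : (low + (high - low) / 2) < r := by
          by_contra hge
          exact absurd ham (ne_of_gt (habove _ hmlen (by omega) (by omega)))
        have htE : 1 ≤ r ∧ ∃ h : (r - 1).toNat < arr.length, arr[(r-1).toNat] = value := by
          refine ⟨by omega, by omega, ?_⟩
          by_contra hne
          have h1 : arr[(r-1).toNat]'(by omega) ≤ value := hbelow (r-1).toNat (by omega) (by omega)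
          have h2 : arr[(low + (high - low) / 2).toNat]'hmlen ≤ arr[(r-1).toNat]'(by omega) :=
            pv_mono hs (by omega) (by omega) (by omega)
          omega
        have hiv := htgt htE
        simp only [if_pos ham, if_pos htE]
        by_cases hend : low + (high - low) / 2 = n - 1
        · -- mid is the last slot: r-1 ≤ n-1 = mid and mid ≤ r-1
          simp only [if_pos hend]
          omega
        · simp only [if_neg hend]
          have hm1len : (low + (high - low) / 2 + 1).toNat < arr.length := by omega
          rw [PySem.List.pyGet?_eq_some_getElem arr (by omega) (by omega)]
          by_cases hgt : value < arr[(low + (high - low) / 2 + 1).toNat]'hm1len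
          · -- mid is the last occurrence: r ≤ mid+1 and mid < r give mid = r-1
            simp only [if_pos hgt]
            have hub : ¬ (low + (high - low) / 2 + 1) < r := by
              intro hlt'
              have := hbelow (low + (high - low) / 2 + 1).toNat hm1len (by omega)
              omega
            omega
          · simp only [if_neg hgt]
            have ham1 : arr[(low + (high - low) / 2 + 1).toNat]'hm1len = value := by
              have h2 : arr[(low + (high - low) / 2).toNat]'hmlen ≤
                  arr[(low + (high - low) / 2 + 1).toNat]'hm1len :=
                pv_mono hs (by omega) (by omega) hm1len
              omega
            simp only [if_pos ham1]
            -- arr[mid+1] = value ≤ value, so mid+1 < r and the new interval still brackets r-1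
            have hub : (low + (high - low) / 2 + 1) < r := by
              by_contra hge
              have := habove (low + (high - low) / 2 + 1).toNat hm1len (by omega) (by omega)
              omega
            rw [ih (low + (high - low) / 2 + 1) high (by omega) hhigh (by omega)
                (fun _ => ⟨by omega, hiv.2⟩)]
            simp only [if_pos htE]
      · simp only [if_neg ham]
        by_cases hlt' : arr[(low + (high - low) / 2).toNat]'hmlen < value
        · -- go right: when the target exists, mid < r - 1 since arr[mid] < value = arr[r-1]
          simp only [if_pos hlt']
          rw [ih (low + (high - low) / 2 + 1) high (by omega) hhigh (by omega) ?_]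
          intro hT
          obtain ⟨hr1, hL, hv⟩ := hT
          have hiv := htgt ⟨hr1, hL, hv⟩
          refine ⟨?_, hiv.2⟩
          by_contra hc
          have hle2 : (r - 1).toNat ≤ (low + (high - low) / 2).toNat := by omega
          have := pv_mono hs hle2 (by omega) hmlen
          omega
        · -- go left: arr[mid] > value, so when the target exists, r-1 < mid
          simp only [if_neg hlt']
          rw [ih low (low + (high - low) / 2 - 1) hlow0 (by omega) (by omega) ?_]
          intro hT
          obtain ⟨hr1, hL, hv⟩ := hT
          have hiv := htgt ⟨hr1, hL, hv⟩
          refine ⟨hiv.1, ?_⟩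
          by_contra hc
          have hle2 : (low + (high - low) / 2).toNat ≤ (r - 1).toNat := by omega
          have := pv_mono hs hle2 (by omega) (show (r-1).toNat < arr.length by omega)
          omega
    · simp only [if_neg hle]
      rcases Decidable.em (1 ≤ r ∧ ∃ h : (r - 1).toNat < arr.length, arr[(r-1).toNat] = value) with hT | hF
      · have := htgt hT; omega
      · simp only [if_neg hF]

-- ===== VERDICT (by name: the statement is the Claim_ definition above) =====
theorem bs_last_eq_spec : Claim_equal_bs_last_eq := by
  intro arr n value _ hpre
  unfold Spec_bs_last_eq bs_last_eq bs_last_eq_alt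
  by_cases hn0 : n ≤ 0
  · -- empty range: A's loop sees low = 0 > high = n-1; B's loop sees lo = 0 ≥ hi = n
    have hA : bsA_loop arr n value 0 (n - 1) (n.toNat + 1) = -1 := by
      simp only [bsA_loop]
      rw [if_neg (by omega)]
    have hB : bsB_loop arr value 0 n (n.toNat + 1) = 0 := by
      simp only [bsB_loop]
      rw [if_neg (by omega)]
    rw [hA, hB]
    norm_num
  · obtain ⟨hs, hn⟩ : List.Pairwise (· ≤ ·) (arr.take n.toNat) ∧ n ≤ (arr.length : Int) := by
      rcases hpre with h | h
      · omega
      · exact h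
    obtain ⟨hB1, hB2, hbelow, habove⟩ :=
      bsB_loop_spec arr value n hs hn (n.toNat + 1) 0 n (le_refl _) (by omega) (le_refl _)
        (by omega) (by intro i h hi'; omega) (by intro i h h1 h2; omega)
    rw [bsA_loop_spec arr n value hs hn (bsB_loop arr value 0 n (n.toNat + 1)) hB1 hB2 hbelow
        habove (n.toNat + 1) 0 (n - 1) (le_refl _) (le_refl _) (by omega)
        (fun hT => ⟨by omega, by omega⟩)]
    by_cases hT : 1 ≤ bsB_loop arr value 0 n (n.toNat + 1) ∧
        ∃ h : (bsB_loop arr value 0 n (n.toNat + 1) - 1).toNat < arr.length,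
          arr[(bsB_loop arr value 0 n (n.toNat + 1) - 1).toNat] = value
    · rw [if_pos hT]
      obtain ⟨hr1, hL, hv⟩ := hT
      rw [if_pos (by omega : (0:Int) ≤ bsB_loop arr value 0 n (n.toNat + 1) - 1)]
      rw [PySem.List.pyGet?_eq_some_getElem arr (by omega) (by omega)]
      exact (if_pos hv).symm
    · rw [if_neg hT]
      by_cases hge : (0:Int) ≤ bsB_loop arr value 0 n (n.toNat + 1) - 1
      · rw [if_pos hge]
        have hL : (bsB_loop arr value 0 n (n.toNat + 1) - 1).toNat < arr.length := by omega
        rw [PySem.List.pyGet?_eq_some_getElem arr (by omega) (by omega)]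
        have hnv : ¬ arr[(bsB_loop arr value 0 n (n.toNat + 1) - 1).toNat]'hL = value :=
          fun hv => hT ⟨by omega, hL, hv⟩
        exact (if_neg hnv).symm
      · rw [if_neg hge]
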